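-- pv_equiv track=rewrite | github.com/law-pal/challenges | enumerate.py | retrieve_char
-- ===== SOURCE A (Python) =====
-- def retrieve_char(string):
--    """
--    Function that puts a string into a dictionary
--    storing the indices of a repeated letter in a lists
--    as values and the letters as keys.
--    """
--    char_indices = dict()
--    for index, char in enumerate(string):
--       if char in char_indices:
--          char_indices[char].append(index)
--       else:
--          char_indices[char] = [index]
--    return char_indices
-- ===== SOURCE B (Python) =====
-- def retrieve_char(string):
--    """Same mapping, built per distinct character: for each first-appearance
--    character, rescan the string once for its indices."""
--    return {c: [i for i, ch in enumerate(string) if ch == c]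
--            for c in dict.fromkeys(string)}
-- ===== Notes on version B (the rewrite author's own statement) =====
-- stated objective: idiomatic
-- what changed: Replaces the single incremental pass that appends each index into a mutated dict with a dict comprehension over the distinct characters (dict.fromkeys for first-appearance order), each building its index list by rescanning the string.
import Mathlib
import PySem

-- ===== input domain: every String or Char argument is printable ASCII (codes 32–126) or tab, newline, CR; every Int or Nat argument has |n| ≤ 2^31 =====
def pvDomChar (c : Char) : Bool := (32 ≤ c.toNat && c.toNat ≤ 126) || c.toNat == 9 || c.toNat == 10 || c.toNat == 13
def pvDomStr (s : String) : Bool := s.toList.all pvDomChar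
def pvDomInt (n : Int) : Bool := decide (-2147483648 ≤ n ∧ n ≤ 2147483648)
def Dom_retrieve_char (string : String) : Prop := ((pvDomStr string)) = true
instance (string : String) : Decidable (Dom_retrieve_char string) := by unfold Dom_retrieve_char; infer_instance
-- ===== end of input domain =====

-- B builds the dict by a comprehension over the distinct characters (one rescan of the
-- string per distinct character) instead of A's single incremental appending pass; same
-- result, idiomatic dict-comprehension shape, not faster.

-- ===== PORT A =====
-- Python's one-char strings are modelled as Char dict keys during the loop and turned
-- into one-char Strings on return (exact: a Python str char IS its one-char string).
def retrieve_char (string : String) : List (String × List Int) :=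
  ((PySem.List.enumerate string.toList).foldl
    (fun d p => if d.contains p.2 then d.modify p.2 [] (· ++ [p.1]) else d.insert p.2 [p.1])
    PySem.Dict.empty).items.map (fun q => (String.mk [q.1], q.2))

-- ===== PORT B =====
def retrieve_char_alt (string : String) : List (String × List Int) :=
  (PySem.List.dedup string.toList).map (fun c =>
    (String.mk [c],
     ((PySem.List.enumerate string.toList).filter (fun p => p.2 == c)).map (·.1)))

-- ===== PRECONDITION & SPEC =====
def Spec_retrieve_char (string : String) (out : List (String × List Int)) : Prop := out = retrieve_char_alt string
instance (string : String) (out : List (String × List Int)) : Decidable (Spec_retrieve_char string out) := by unfold Spec_retrieve_char; infer_instance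

-- ===== CLAIM (what is proved, stated in full; the proofs are below) =====
def Claim_equal_retrieve_char : Prop := ∀ (string : String), Dom_retrieve_char string → Spec_retrieve_char string (retrieve_char string)

-- ===== LEMMAS AND PROOFS =====

-- A's two branches are one dict 'modify' (on a missing key it inserts [] ++ [index]).
theorem retrieve_char_step_eq (d : PySem.Dict Char (List Int)) (p : Int × Char) :
    (if d.contains p.2 then d.modify p.2 [] (· ++ [p.1]) else d.insert p.2 [p.1])
      = d.modify p.2 [] (· ++ [p.1]) := by
  by_cases h : d.contains p.2 = true
  · simp [h]
  · have h' : d.contains p.2 = false := by simpa using h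
    simp [h, PySem.Dict.modify, PySem.Dict.getD_of_not_contains (d := d) (k := p.2) (h := h')]

theorem retrieve_char_eq_alt (string : String) :
    retrieve_char string = retrieve_char_alt string := by
  unfold retrieve_char retrieve_char_alt
  set cs := string.toList
  set e := PySem.List.enumerate cs with he
  have hfold : List.foldl
      (fun (d : PySem.Dict Char (List Int)) (p : Int × Char) =>
        if d.contains p.2 then d.modify p.2 [] (· ++ [p.1]) else d.insert p.2 [p.1])
      PySem.Dict.empty e
      = List.foldl (fun d p => d.modify p.2 [] (· ++ [p.1])) PySem.Dict.empty e :=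
    PySem.List.foldl_congr_mem e _ _ PySem.Dict.empty (fun acc x _ => retrieve_char_step_eq acc x)
  rw [hfold]
  have hnd : ((List.foldl (fun d (p : Int × Char) => d.modify p.2 [] (· ++ [p.1]))
      PySem.Dict.empty e).keys).Nodup := by
    exact PySem.Dict.nodup_keys_foldl_modify_key e (·.2) [] (fun d x v => v ++ [x.1]) _ (by simp)
  rw [PySem.Dict.items_eq_map_keys _ hnd []]
  rw [PySem.Dict.keys_foldl_modify_key e (·.2) [] (fun d x v => v ++ [x.1])]
  have hkeys : PySem.Set.update (PySem.Dict.empty (κ := Char) (ν := List Int)).keys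
      (e.map (·.2)) = PySem.List.dedup cs := by
    simp only [PySem.List.dedup_eq_ofList, PySem.Set.update, PySem.Set.ofList,
      PySem.Dict.keys_empty, he, PySem.List.map_snd_enumerate, PySem.Set.empty]
  rw [hkeys, List.map_map]
  refine List.map_congr_left ?_
  intro k hk
  have hget : (List.foldl (fun d (p : Int × Char) => d.modify p.2 [] (· ++ [p.1]))
      PySem.Dict.empty e).getD k [] = ((e.filter (fun p => p.2 == k)).map (·.1)) := by
    have := PySem.Dict.getD_foldl_modify_append (e.map (fun p => (p.2, p.1)))
      PySem.Dict.empty k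
    rw [List.foldl_map] at this
    simpa [List.filter_map, Function.comp, List.map_map] using this
  simp [Function.comp, hget]

-- ===== VERDICT (by name: the statement is the Claim_ definition above) =====
theorem retrieve_char_spec : Claim_equal_retrieve_char := by
  intro string _
  exact retrieve_char_eq_alt string
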